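-- pv_equiv track=rewrite | github.com/mohamedahmed-cloud/IEEE-ZSB-Technical-Rookies-22 | Task_4/problem_91_Electronics_Shop.py | getMoneySpent
-- ===== SOURCE A (Python) =====
-- def getMoneySpent(keyboards, drives, b):
--     #
--     # Write your code here.
--
--
-- #    Strat of my code ##########################################
--     list_1=[]
--
--     if b< ( min(keyboards)+min(drives)):
--         return -1
--
--     for i in keyboards:
--         for j in drives:
--             if  b>=i+j :   # To prevent adding any value bigger that my budget "b"
--                 list_1.append(i+j)
--     return max(list_1)               # Our Output
-- ===== SOURCE B (Python) =====
-- def getMoneySpent(keyboards, drives, b):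
--     # Sort drives descending; for each keyboard the first affordable drive is the
--     # best one, so the inner scan stops early instead of building all pair sums.
--     ds = sorted(drives, reverse=True)
--     best = None
--     for k in keyboards:
--         for d in ds:
--             if k + d <= b:
--                 s = k + d
--                 if best is None or s > best:
--                     best = s
--                 break
--     return -1 if best is None else best
-- ===== Notes on version B (the rewrite author's own statement) =====
-- stated objective: alternative
-- what changed: Instead of building the list of all affordable pair sums and taking min/max over it, B sorts the drives once in descending order and, per keyboard, takes the first affordable drive (the per-keyboard maximum) with early exit, tracking the overall best in an Option accumulator; no min pre-check and no intermediate list.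
import Mathlib
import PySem

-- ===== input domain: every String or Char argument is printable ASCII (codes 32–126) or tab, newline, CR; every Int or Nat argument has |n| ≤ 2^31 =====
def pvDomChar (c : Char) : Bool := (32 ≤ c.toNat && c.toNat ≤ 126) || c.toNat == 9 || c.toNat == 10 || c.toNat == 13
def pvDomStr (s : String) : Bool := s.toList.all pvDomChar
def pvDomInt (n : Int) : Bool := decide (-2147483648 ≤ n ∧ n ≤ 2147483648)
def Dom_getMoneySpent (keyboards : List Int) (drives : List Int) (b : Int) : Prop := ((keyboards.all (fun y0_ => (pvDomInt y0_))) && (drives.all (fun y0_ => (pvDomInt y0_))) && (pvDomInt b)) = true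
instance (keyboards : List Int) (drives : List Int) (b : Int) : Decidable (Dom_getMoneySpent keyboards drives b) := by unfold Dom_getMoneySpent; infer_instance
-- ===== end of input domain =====

-- B sorts drives descending and takes, per keyboard, the first affordable drive
-- (its per-keyboard optimum) with early exit, instead of A's list of all
-- affordable pair sums plus min-based guard; equivalence of return values is proved.

-- ===== PORT A =====
def getMoneySpent (keyboards : List Int) (drives : List Int) (b : Int) : Int :=
  let list1 := keyboards.foldl
    (fun acc i => drives.foldl
      (fun acc2 j => if b ≥ i + j then acc2 ++ [i + j] else acc2) acc) []
  match PySem.List.min? keyboards (fun x => x), PySem.List.min? drives (fun x => x) with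
  | some mk, some md =>
    if b < mk + md then -1
    else
      match PySem.List.max? list1 (fun x => x) with
      | some m => m
      | none => 0      -- max([]) raises in Python; unreachable under Pre_
  | _, _ => 0          -- min of empty raises in Python; excluded by Pre_

-- ===== PORT B =====
def getMoneySpent_alt (keyboards : List Int) (drives : List Int) (b : Int) : Int :=
  let ds := PySem.List.sorted drives (fun x => x) true
  let best := keyboards.foldl
    (fun best k =>
      match ds.find? (fun d => decide (k + d ≤ b)) with
      | some d =>
        let s := k + d
        match best with
        | none => some s
        | some v => if s > v then some s else some v
      | none => best)
    (none : Option Int)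
  match best with
  | some v => v
  | none => -1

-- ===== PRECONDITION & SPEC =====
-- Pre_ excludes exactly the inputs where A raises ValueError (min of an empty list).
def Pre_getMoneySpent (keyboards : List Int) (drives : List Int) (b : Int) : Prop :=
  keyboards ≠ [] ∧ drives ≠ []
instance (keyboards : List Int) (drives : List Int) (b : Int) : Decidable (Pre_getMoneySpent keyboards drives b) := by unfold Pre_getMoneySpent; infer_instance

def pvWitness_getMoneySpent : List Int × List Int × Int := ([4, 7], [5, 2, 8], 10)

def Spec_getMoneySpent (keyboards : List Int) (drives : List Int) (b : Int) (out : Int) : Prop := out = getMoneySpent_alt keyboards drives b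
instance (keyboards : List Int) (drives : List Int) (b : Int) (out : Int) : Decidable (Spec_getMoneySpent keyboards drives b out) := by unfold Spec_getMoneySpent; infer_instance

-- ===== CLAIM (what is proved, stated in full; the proofs are below) =====
def Claim_equal_getMoneySpent : Prop := ∀ (keyboards : List Int) (drives : List Int) (b : Int), Dom_getMoneySpent keyboards drives b → Pre_getMoneySpent keyboards drives b → Spec_getMoneySpent keyboards drives b (getMoneySpent keyboards drives b)

-- ===== LEMMAS AND PROOFS =====

-- the list of all affordable pair sums, in A's construction order
def pvSums (keyboards : List Int) (drives : List Int) (b : Int) : List Int :=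
  keyboards.flatMap (fun i => (drives.filter (fun j => decide (b ≥ i + j))).map (fun j => i + j))

-- option-maximum combiner (value of B's accumulator step)
def pvOMax (x y : Option Int) : Option Int :=
  match x, y with
  | none, y => y
  | some v, none => some v
  | some v, some w => some (max v w)

theorem pvOMax_none_right (x : Option Int) : pvOMax x none = x := by
  cases x <;> rfl

theorem pvOMax_none_left (y : Option Int) : pvOMax none y = y := rfl

theorem pvOMax_assoc (x y z : Option Int) : pvOMax (pvOMax x y) z = pvOMax x (pvOMax y z) := by
  cases x <;> cases y <;> cases z <;> simp [pvOMax, max_assoc]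

-- a member that dominates the list IS the value of max?
theorem max?_eq_of_isMax (l : List Int) (m : Int) (hm : m ∈ l)
    (hmax : ∀ x ∈ l, x ≤ m) : PySem.List.max? l (fun x => x) = some m := by
  cases h : PySem.List.max? l (fun x => x) with
  | none =>
    rw [PySem.List.max?_eq_none_iff] at h
    simp [h] at hm
  | some m' =>
    have h1 := PySem.List.max?_mem h
    have h2 := PySem.List.max?_isMax h
    have := le_antisymm (hmax m' h1) (h2 m hm)
    simp [this]

theorem max?_append (l1 l2 : List Int) :
    PySem.List.max? (l1 ++ l2) (fun x => x)
      = pvOMax (PySem.List.max? l1 (fun x => x)) (PySem.List.max? l2 (fun x => x)) := by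
  cases h1 : PySem.List.max? l1 (fun x => x) with
  | none =>
    rw [PySem.List.max?_eq_none_iff] at h1
    subst h1; simp [pvOMax]
  | some v =>
    cases h2 : PySem.List.max? l2 (fun x => x) with
    | none =>
      rw [PySem.List.max?_eq_none_iff] at h2
      subst h2; simpa [pvOMax] using h1
    | some w =>
      apply max?_eq_of_isMax
      · rcases le_total v w with h | h
        · simp [max_eq_right h]; exact Or.inr (PySem.List.max?_mem h2)
        · simp [max_eq_left h]; exact Or.inl (PySem.List.max?_mem h1)
      · intro x hx
        rcases List.mem_append.mp hx with hx | hx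
        · exact le_trans (PySem.List.max?_isMax h1 x hx) (le_max_left _ _)
        · exact le_trans (PySem.List.max?_isMax h2 x hx) (le_max_right _ _)

-- first hit of find? in a nonincreasing list is the maximum satisfier
theorem find?_desc_some (p : Int → Bool) (l : List Int)
    (hp : l.Pairwise (fun a c => c ≤ a)) (d : Int) (h : l.find? p = some d) :
    p d = true ∧ d ∈ l ∧ ∀ x ∈ l, p x = true → x ≤ d := by
  induction l with
  | nil => simp at h
  | cons a t ih =>
    by_cases ha : p a = true
    · rw [List.find?_cons_of_pos ha] at h
      injection h with h; subst h
      refine ⟨ha, List.mem_cons_self, ?_⟩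
      intro x hx _
      rcases List.mem_cons.mp hx with rfl | hx
      · exact le_refl _
      · exact (List.pairwise_cons.mp hp).1 x hx
    · rw [List.find?_cons_of_neg ha] at h
      obtain ⟨hpd, hmem, hmax⟩ := ih (List.pairwise_cons.mp hp).2 h
      refine ⟨hpd, List.mem_cons_of_mem _ hmem, ?_⟩
      intro x hx hpx
      rcases List.mem_cons.mp hx with rfl | hx
      · exact absurd hpx ha
      · exact hmax x hx hpx

-- B's per-keyboard step value equals max? of the per-keyboard slice of pvSums
theorem find?_eq_max?_piece (drives : List Int) (b k : Int) :
    ((PySem.List.sorted drives (fun x => x) true).find? (fun d => decide (k + d ≤ b))).map (fun d => k + d)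
      = PySem.List.max? ((drives.filter (fun j => decide (b ≥ k + j))).map (fun j => k + j)) (fun x => x) := by
  have hperm : (PySem.List.sorted drives (fun x => x) true).Perm drives :=
    PySem.List.sorted_perm drives (fun x => x) true
  have hpair : (PySem.List.sorted drives (fun x => x) true).Pairwise (fun a c => c ≤ a) :=
    PySem.List.sorted_pairwise_rev drives (fun x => x)
  cases h : (PySem.List.sorted drives (fun x => x) true).find? (fun d => decide (k + d ≤ b)) with
  | none =>
    have := List.find?_eq_none.mp h
    cases hm : PySem.List.max? ((drives.filter (fun j => decide (b ≥ k + j))).map (fun j => k + j)) (fun x => x) with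
    | none => rfl
    | some m =>
      exfalso
      have hmem := PySem.List.max?_mem hm
      simp only [List.mem_map, List.mem_filter] at hmem
      obtain ⟨j, ⟨hj, hjle⟩, rfl⟩ := hmem
      have hj' : j ∈ PySem.List.sorted drives (fun x => x) true := hperm.mem_iff.mpr hj
      have := this j hj'
      simp at this hjle
      omega
  | some d =>
    obtain ⟨hpd, hmem, hmax⟩ := find?_desc_some _ _ hpair d h
    simp only [Option.map_some]
    symm
    apply max?_eq_of_isMax
    · simp only [List.mem_map, List.mem_filter]
      refine ⟨d, ⟨hperm.mem_iff.mp hmem, ?_⟩, rfl⟩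
      simp at hpd ⊢; omega
    · intro x hx
      simp only [List.mem_map, List.mem_filter] at hx
      obtain ⟨j, ⟨hj, hjle⟩, rfl⟩ := hx
      have : j ≤ d := by
        apply hmax j (hperm.mem_iff.mpr hj)
        simp at hjle ⊢; omega
      omega

-- B's fold over the keyboards computes the option-maximum of pvSums
theorem foldB_eq (keyboards drives : List Int) (b : Int) (acc : Option Int) :
    keyboards.foldl
      (fun best k =>
        match (PySem.List.sorted drives (fun x => x) true).find? (fun d => decide (k + d ≤ b)) with
        | some d =>
          let s := k + d
          match best with
          | none => some s
          | some v => if s > v then some s else some v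
        | none => best)
      acc
    = pvOMax acc (PySem.List.max? (pvSums keyboards drives b) (fun x => x)) := by
  induction keyboards generalizing acc with
  | nil =>
    rw [List.foldl_nil, show (PySem.List.max? (pvSums [] drives b) (fun x => x)) = none from rfl,
      pvOMax_none_right]
  | cons k t ih =>
    rw [List.foldl_cons, ih]
    have hsums : pvSums (k :: t) drives b
        = (drives.filter (fun j => decide (b ≥ k + j))).map (fun j => k + j) ++ pvSums t drives b := by
      simp [pvSums]
    rw [hsums, max?_append, ← find?_eq_max?_piece drives b k, ← pvOMax_assoc]
    congr 1
    cases hf : (PySem.List.sorted drives (fun x => x) true).find? (fun d => decide (k + d ≤ b)) with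
    | none => simp [pvOMax_none_right]
    | some d =>
      cases acc with
      | none => rfl
      | some v =>
        simp only [Option.map_some, pvOMax]
        by_cases hv : k + d > v
        · simp [hv, max_eq_right (le_of_lt hv)]
        · simp [hv, max_eq_left (by omega : k + d ≤ v)]

-- A's nested loop builds exactly pvSums
theorem listA_eq (keyboards drives : List Int) (b : Int) (acc : List Int) :
    keyboards.foldl
      (fun acc i => drives.foldl
        (fun acc2 j => if b ≥ i + j then acc2 ++ [i + j] else acc2) acc) acc
    = acc ++ pvSums keyboards drives b := by
  induction keyboards generalizing acc with
  | nil => simp [pvSums]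
  | cons k t ih =>
    rw [List.foldl_cons, ih, PySem.List.foldl_append_ite (fun j => b ≥ k + j) (fun j => k + j)]
    simp [pvSums]

-- A's guard fires exactly when no pair is affordable
theorem guard_iff (keyboards drives : List Int) (b mk md : Int)
    (hk : PySem.List.min? keyboards (fun x => x) = some mk)
    (hd : PySem.List.min? drives (fun x => x) = some md) :
    b < mk + md ↔ pvSums keyboards drives b = [] := by
  constructor
  · intro hlt
    unfold pvSums
    rw [List.flatMap_eq_nil_iff]
    intro i hi
    simp only [List.map_eq_nil_iff, List.filter_eq_nil_iff]
    intro j hj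
    have h1 := PySem.List.min?_isMin hk i hi
    have h2 := PySem.List.min?_isMin hd j hj
    simp at h1 h2 ⊢
    omega
  · intro hnil
    have hmk := PySem.List.min?_mem hk
    have hmd := PySem.List.min?_mem hd
    by_contra hge
    have : mk + md ∈ pvSums keyboards drives b := by
      simp only [pvSums, List.mem_flatMap]
      refine ⟨mk, hmk, ?_⟩
      simp only [List.mem_map, List.mem_filter]
      exact ⟨md, ⟨hmd, by simp; omega⟩, rfl⟩
    rw [hnil] at this
    simp at this

-- ===== VERDICT (by name: the statement is the Claim_ definition above) =====
theorem getMoneySpent_spec : Claim_equal_getMoneySpent := by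
  intro keyboards drives b _ hpre
  obtain ⟨hk, hd⟩ := hpre
  unfold Spec_getMoneySpent getMoneySpent getMoneySpent_alt
  simp only [listA_eq, foldB_eq, List.nil_append, pvOMax_none_left]
  obtain ⟨mk, hmk⟩ : ∃ mk, PySem.List.min? keyboards (fun x => x) = some mk := by
    cases h : PySem.List.min? keyboards (fun x => x) with
    | none => exact absurd ((PySem.List.min?_eq_none_iff _ _).mp h) hk
    | some m => exact ⟨m, rfl⟩
  obtain ⟨md, hmd⟩ : ∃ md, PySem.List.min? drives (fun x => x) = some md := by
    cases h : PySem.List.min? drives (fun x => x) with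
    | none => exact absurd ((PySem.List.min?_eq_none_iff _ _).mp h) hd
    | some m => exact ⟨m, rfl⟩
  simp only [hmk, hmd]
  by_cases hlt : b < mk + md
  · have hnil := (guard_iff keyboards drives b mk md hmk hmd).mp hlt
    rw [if_pos hlt, hnil, show (PySem.List.max? ([] : List Int) (fun x => x)) = none from rfl]
  · have hne : pvSums keyboards drives b ≠ [] := fun h =>
      hlt ((guard_iff keyboards drives b mk md hmk hmd).mpr h)
    rw [if_neg hlt]
    cases h : PySem.List.max? (pvSums keyboards drives b) (fun x => x) with
    | none => exact absurd ((PySem.List.max?_eq_none_iff _ _).mp h) hne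
    | some m => rfl
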